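-- pv_equiv track=rewrite | github.com/Parth-Kedari/AI_RISK_Management | backend/utils.py | parse_suggested_actions
-- ===== SOURCE A (Python) =====
-- def parse_suggested_actions(suggested_fix):
--     if not suggested_fix or suggested_fix == "No immediate action required.":
--         return []
--     actions = []
--     lines = suggested_fix.split('\n')
--     current_action = ""
--     for line in lines:
--         line = line.strip()
--         if not line:
--             if current_action:
--                 actions.append(current_action)
--                 current_action = ""
--             continue
--         if (line.startswith('- ') or line.startswith('• ') or
--             any(line.startswith(f"{i}.") for i in range(1, 11))):
--             if current_action:
--                 actions.append(current_action)
--             current_action = line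
--         else:
--             if current_action:
--                 current_action += " " + line
--             else:
--                 current_action = line
--     if current_action:
--         actions.append(current_action)
--     if not actions and suggested_fix:
--         actions = [suggested_fix]
--     return actions
-- ===== SOURCE B (Python) =====
-- def parse_suggested_actions(suggested_fix):
--     if not suggested_fix or suggested_fix == "No immediate action required.":
--         return []
--
--     def is_starter(line):
--         return (line.startswith('- ') or line.startswith('• ')
--                 or any(line.startswith(f"{i}.") for i in range(1, 11)))
--
--     def parse_block(block):
--         # first action = head line plus following non-starter lines; recurse on the rest
--         if not block:
--             return []
--         i = 1
--         while i < len(block) and not is_starter(block[i]):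
--             i += 1
--         return [" ".join(block[:i])] + parse_block(block[i:])
--
--     # phase 1: split into blocks of consecutive non-blank (stripped) lines
--     blocks = []
--     cur = []
--     for raw in suggested_fix.split('\n'):
--         line = raw.strip()
--         if line:
--             cur.append(line)
--         elif cur:
--             blocks.append(cur)
--             cur = []
--     if cur:
--         blocks.append(cur)
--
--     # phase 2: parse each block independently
--     actions = [a for b in blocks for a in parse_block(b)]
--     return actions if actions else [suggested_fix]
-- ===== Notes on version B (the rewrite author's own statement) =====
-- stated objective: alternative
-- what changed: A is a single-pass state machine holding (actions, current_action) strings; B first splits the stripped lines into blank-separated blocks with a list accumulator and then parses each block independently by recursion, cutting it at starter lines and space-joining each group.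
import Mathlib
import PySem

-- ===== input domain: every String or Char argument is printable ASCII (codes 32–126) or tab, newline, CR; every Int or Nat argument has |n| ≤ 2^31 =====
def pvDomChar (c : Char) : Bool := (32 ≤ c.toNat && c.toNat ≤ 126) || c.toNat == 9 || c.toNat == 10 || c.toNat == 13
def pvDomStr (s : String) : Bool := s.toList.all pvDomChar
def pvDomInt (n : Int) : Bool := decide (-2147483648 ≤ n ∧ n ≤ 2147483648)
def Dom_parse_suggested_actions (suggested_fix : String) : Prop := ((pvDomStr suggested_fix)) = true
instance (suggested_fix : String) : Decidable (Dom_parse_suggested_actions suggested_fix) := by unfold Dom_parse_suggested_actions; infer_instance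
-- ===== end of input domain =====

-- B re-implements the parser as two phases (split into blank-separated blocks, then parse each
-- block recursively by splitting at starter lines) instead of A's one-pass accumulator state
-- machine; objective: alternative decomposition, same cost.

-- ===== PORT A =====
-- the starter test of A's 'if' (line.startswith('- ') or … or any(line.startswith(f"{i}.") for i in range(1, 11)))
def pvIsStarter (line : String) : Bool :=
  PySem.Str.startswith line "- " || PySem.Str.startswith line "• " ||
    (PySem.List.pyRange 1 11 1).any (fun i => PySem.Str.startswith line (PySem.Int.toStr i ++ "."))

-- one iteration of A's 'for line in lines' loop; state = (actions, current_action)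
def pvStepA (st : List String × String) (raw : String) : List String × String :=
  let line := PySem.Str.strip raw
  if line = "" then
    (if st.2 ≠ "" then st.1 ++ [st.2] else st.1, "")
  else if pvIsStarter line then
    (if st.2 ≠ "" then st.1 ++ [st.2] else st.1, line)
  else if st.2 ≠ "" then (st.1, st.2 ++ " " ++ line)
  else (st.1, line)

def parse_suggested_actions (suggested_fix : String) : List String :=
  if suggested_fix = "" ∨ suggested_fix = "No immediate action required." then []
  else
    -- suggested_fix.split('\n'): sep "\n" ≠ "", so split? is some
    let lines := (PySem.Str.split? suggested_fix "\n").getD []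
    let st := lines.foldl pvStepA ([], "")
    let actions := if st.2 ≠ "" then st.1 ++ [st.2] else st.1
    if actions = [] ∧ suggested_fix ≠ "" then [suggested_fix] else actions

-- ===== PORT B =====
-- parse_block: the while loop scans to the first starter index i ≥ 1, i.e. block[1:i] =
-- takeWhile non-starter, block[i:] = dropWhile non-starter; " ".join is PySem.Str.join.
def pvParseBlock : List String → List String
  | [] => []
  | head :: rest =>
    let pre := rest.takeWhile (fun l => !pvIsStarter l)
    PySem.Str.join " " (head :: pre) :: pvParseBlock (rest.dropWhile (fun l => !pvIsStarter l))
termination_by block => block.length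
decreasing_by
  have := List.length_dropWhile_le (fun l => !pvIsStarter l) rest
  simp; omega

-- one iteration of B's block-collecting loop; state = (blocks, cur)
def pvStepB (st : List (List String) × List String) (raw : String) : List (List String) × List String :=
  let line := PySem.Str.strip raw
  if line ≠ "" then (st.1, st.2 ++ [line])
  else if st.2 ≠ [] then (st.1 ++ [st.2], [])
  else st

def parse_suggested_actions_alt (suggested_fix : String) : List String :=
  if suggested_fix = "" ∨ suggested_fix = "No immediate action required." then []
  else
    let st := ((PySem.Str.split? suggested_fix "\n").getD []).foldl pvStepB ([], [])
    let blocks := if st.2 ≠ [] then st.1 ++ [st.2] else st.1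
    let actions := blocks.flatMap pvParseBlock
    if actions = [] then [suggested_fix] else actions

-- ===== PRECONDITION & SPEC =====
def Spec_parse_suggested_actions (suggested_fix : String) (out : List String) : Prop := out = parse_suggested_actions_alt suggested_fix
instance (suggested_fix : String) (out : List String) : Decidable (Spec_parse_suggested_actions suggested_fix out) := by unfold Spec_parse_suggested_actions; infer_instance

-- ===== CLAIM (what is proved, stated in full; the proofs are below) =====
def Claim_equal_parse_suggested_actions : Prop := ∀ (suggested_fix : String), Dom_parse_suggested_actions suggested_fix → Spec_parse_suggested_actions suggested_fix (parse_suggested_actions suggested_fix)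

-- ===== LEMMAS AND PROOFS =====

-- recursive characterisation of A's loop: actions emitted from 'lines' given current_action 'cur'
def pvF : List String → String → List String
  | [], cur => if cur ≠ "" then [cur] else []
  | raw :: rest, cur =>
    let line := PySem.Str.strip raw
    if line = "" then (if cur ≠ "" then [cur] else []) ++ pvF rest ""
    else if pvIsStarter line then (if cur ≠ "" then [cur] else []) ++ pvF rest line
    else pvF rest (if cur ≠ "" then cur ++ " " ++ line else line)

-- recursive characterisation of B's block-collecting loop, given partial block 'cur'
def pvBlocksFrom : List String → List String → List (List String)
  | [], cur => if cur ≠ [] then [cur] else []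
  | raw :: rest, cur =>
    let line := PySem.Str.strip raw
    if line ≠ "" then pvBlocksFrom rest (cur ++ [line])
    else if cur ≠ [] then cur :: pvBlocksFrom rest []
    else pvBlocksFrom rest []

-- the stripped non-blank prefix of 'lines' (rest of the current block) …
def pvTake : List String → List String
  | [] => []
  | raw :: rest => if PySem.Str.strip raw ≠ "" then PySem.Str.strip raw :: pvTake rest else []

-- … and the blocks after it
def pvRest : List String → List (List String)
  | [] => []
  | raw :: rest => if PySem.Str.strip raw ≠ "" then pvRest rest else pvBlocksFrom rest []

theorem pvFoldA (lines : List String) : ∀ (acts : List String) (cur : String),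
    (fun st : List String × String => if st.2 ≠ "" then st.1 ++ [st.2] else st.1)
      (lines.foldl pvStepA (acts, cur)) = acts ++ pvF lines cur := by
  induction lines with
  | nil => intro acts cur; simp [pvF]; split <;> simp
  | cons raw rest ih =>
    intro acts cur
    simp only [List.foldl_cons, pvF]
    by_cases h1 : PySem.Str.strip raw = ""
    · by_cases h2 : cur = "" <;> simp [pvStepA, h1, h2, ih]
    · by_cases h3 : pvIsStarter (PySem.Str.strip raw)
      · by_cases h2 : cur = "" <;> simp [pvStepA, h1, h2, h3, ih]
      · by_cases h2 : cur = "" <;> simp [pvStepA, h1, h2, h3, ih]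

theorem pvFoldB (lines : List String) : ∀ (bs : List (List String)) (cur : List String),
    (fun st : List (List String) × List String => if st.2 ≠ [] then st.1 ++ [st.2] else st.1)
      (lines.foldl pvStepB (bs, cur)) = bs ++ pvBlocksFrom lines cur := by
  induction lines with
  | nil => intro bs cur; simp [pvBlocksFrom]; split <;> simp
  | cons raw rest ih =>
    intro bs cur
    simp only [List.foldl_cons, pvBlocksFrom]
    by_cases h1 : PySem.Str.strip raw = ""
    · by_cases h2 : cur = [] <;> simp [pvStepB, h1, h2, ih]
    · simp [pvStepB, h1, ih]

theorem pvJoin_nil : PySem.Str.join " " [] = "" := by apply String.toList_inj.mp; simp [PySem.Chars.join_nil]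

theorem pvJoin_singleton (x : String) : PySem.Str.join " " [x] = x := by apply String.toList_inj.mp; simp [PySem.Chars.join_singleton]

theorem pvCharsJoin_append (sep : List Char) (q : List Char) :
    ∀ (ps : List (List Char)), ps ≠ [] →
    PySem.Chars.join sep (ps ++ [q]) = PySem.Chars.join sep ps ++ sep ++ q := by
  intro ps
  induction ps with
  | nil => simp
  | cons p ps ih =>
    intro _
    cases ps with
    | nil => simp [PySem.Chars.join_cons_cons, PySem.Chars.join_singleton]
    | cons p2 ps2 =>
      rw [List.cons_append, PySem.Chars.join_cons_cons]
      rw [show (p2 :: ps2) ++ [q] = p2 :: (ps2 ++ [q]) from rfl] at *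
      rw [PySem.Chars.join_cons_cons, ih (by simp)]
      simp [List.append_assoc]

theorem pvJoin_append (P : List String) (l : String) (h : P ≠ []) :
    PySem.Str.join " " (P ++ [l]) = PySem.Str.join " " P ++ " " ++ l := by
  apply String.toList_inj.mp
  simp only [PySem.Str.toList_join, String.toList_append, List.map_append, List.map_cons, List.map_nil]
  exact pvCharsJoin_append _ _ _ (by simpa using h)

theorem pvJoin_ne_empty (P : List String) (h : P ≠ []) (h2 : ∀ x ∈ P, x ≠ "") :
    PySem.Str.join " " P ≠ "" := by
  intro hc
  have hl := congrArg String.toList hc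
  simp only [PySem.Str.toList_join] at hl
  match P, h with
  | [x], _ =>
    simp [PySem.Chars.join_singleton] at hl
    exact h2 x (by simp) (String.toList_inj.mp (by simp [hl]))
  | x :: y :: rest, _ =>
    simp only [List.map_cons, PySem.Chars.join_cons_cons] at hl
    simp at hl

theorem pvBlocksFrom_head (lines : List String) : ∀ (Q : List String), Q ≠ [] →
    pvBlocksFrom lines Q = (Q ++ pvTake lines) :: pvRest lines := by
  induction lines with
  | nil => intro Q hQ; simp [pvBlocksFrom, pvTake, pvRest, hQ]
  | cons raw rest ih =>
    intro Q hQ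
    by_cases h1 : PySem.Str.strip raw = ""
    · simp [pvBlocksFrom, pvTake, pvRest, h1, hQ]
    · simp only [pvBlocksFrom, pvTake, pvRest, h1, if_pos, ne_eq, not_false_iff]
      rw [ih (Q ++ [PySem.Str.strip raw]) (by simp)]
      simp

theorem pvParseBlock_closed (p0 : String) (ptail : List String)
    (h : ∀ x ∈ ptail, pvIsStarter x = false) :
    pvParseBlock (p0 :: ptail) = [PySem.Str.join " " (p0 :: ptail)] := by
  rw [pvParseBlock]
  rw [List.takeWhile_eq_self_iff.mpr (by intro x hx; simp [h x hx])]
  rw [List.dropWhile_eq_nil_iff.mpr (by intro x hx; simp [h x hx])]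
  simp [pvParseBlock]

theorem pvParseBlock_split (p0 l : String) (ptail tail : List String)
    (h : ∀ x ∈ ptail, pvIsStarter x = false) (hl : pvIsStarter l = true) :
    pvParseBlock (p0 :: (ptail ++ l :: tail)) =
      PySem.Str.join " " (p0 :: ptail) :: pvParseBlock (l :: tail) := by
  rw [pvParseBlock]
  have ht : (ptail ++ l :: tail).takeWhile (fun x => !pvIsStarter x) = ptail := by
    rw [List.takeWhile_append]
    rw [List.takeWhile_eq_self_iff.mpr (by intro x hx; simp [h x hx])]
    simp [hl]
  have hd : (ptail ++ l :: tail).dropWhile (fun x => !pvIsStarter x) = l :: tail := by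
    rw [List.dropWhile_append]
    rw [List.dropWhile_eq_nil_iff.mpr (by intro x hx; simp [h x hx])]
    simp [hl]
  rw [ht, hd]

theorem pvMain (lines : List String) : ∀ (pending : List String),
    (∀ x ∈ pending, x ≠ "") → (∀ x ∈ pending.tail, pvIsStarter x = false) →
    pvF lines (PySem.Str.join " " pending) =
      (pvBlocksFrom lines pending).flatMap pvParseBlock := by
  induction lines with
  | nil =>
    intro pending h1 h2
    cases pending with
    | nil => simp [pvF, pvBlocksFrom, pvJoin_nil]
    | cons p0 pt =>
      have hj : PySem.Str.join " " (p0 :: pt) ≠ "" := pvJoin_ne_empty _ (by simp) h1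
      simp [pvF, pvBlocksFrom, hj, pvParseBlock_closed p0 pt (by simpa using h2)]
  | cons raw rest ih =>
    intro pending h1 h2
    rw [pvF, pvBlocksFrom]
    by_cases hb : PySem.Str.strip raw = ""
    · cases pending with
      | nil =>
        simp only [hb, pvJoin_nil]
        simp only [ne_eq, not_true_eq_false, if_false, reduceIte, List.nil_append]
        have := ih [] (by simp) (by simp)
        rw [pvJoin_nil] at this
        simpa using this
      | cons p0 pt =>
        have hj : PySem.Str.join " " (p0 :: pt) ≠ "" := pvJoin_ne_empty _ (by simp) h1
        have := ih [] (by simp) (by simp)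
        rw [pvJoin_nil] at this
        simp [hb, hj, this, pvParseBlock_closed p0 pt (by simpa using h2)]
    · by_cases hs : pvIsStarter (PySem.Str.strip raw)
      · cases pending with
        | nil =>
          have := ih [PySem.Str.strip raw] (by simpa using hb) (by simp)
          rw [pvJoin_singleton] at this
          simp [hb, hs, pvJoin_nil, this]
        | cons p0 pt =>
          have hj : PySem.Str.join " " (p0 :: pt) ≠ "" := pvJoin_ne_empty _ (by simp) h1
          have hih := ih [PySem.Str.strip raw] (by simpa using hb) (by simp)
          rw [pvJoin_singleton] at hih
          rw [pvBlocksFrom_head rest ([PySem.Str.strip raw]) (by simp)] at hih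
          simp only [hb, hs, hj, if_false, if_true, ne_eq, not_false_iff]
          rw [pvBlocksFrom_head rest ((p0 :: pt) ++ [PySem.Str.strip raw]) (by simp)]
          have hassoc : ((p0 :: pt) ++ [PySem.Str.strip raw]) ++ pvTake rest
              = p0 :: (pt ++ PySem.Str.strip raw :: pvTake rest) := by simp
          rw [hassoc]
          rw [List.flatMap_cons,
            pvParseBlock_split p0 (PySem.Str.strip raw) pt (pvTake rest)
              (by simpa using h2) hs]
          simp only [List.singleton_append, List.flatMap_cons] at hih
          simp [hih]
      · cases pending with
        | nil =>
          have := ih [PySem.Str.strip raw] (by simpa using hb) (by simp)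
          rw [pvJoin_singleton] at this
          simp [hb, hs, pvJoin_nil, this]
        | cons p0 pt =>
          have hj : PySem.Str.join " " (p0 :: pt) ≠ "" := pvJoin_ne_empty _ (by simp) h1
          have hih := ih ((p0 :: pt) ++ [PySem.Str.strip raw])
            (by intro x hx
                rw [List.mem_append] at hx
                rcases hx with h | h
                · exact h1 x h
                · simp only [List.mem_singleton] at h; simp [h, hb])
            (by intro x hx
                simp only [List.cons_append, List.tail_cons, List.mem_append] at hx
                rcases hx with h | h
                · exact h2 x (by simpa using h)
                · simp only [List.mem_singleton] at h; simp [h]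
                  simpa using hs)
          rw [pvJoin_append (p0 :: pt) _ (by simp)] at hih
          simp [hb, hs, hj, hih]

-- ===== VERDICT (by name: the statement is the Claim_ definition above) =====
theorem parse_suggested_actions_spec : Claim_equal_parse_suggested_actions := by
  unfold Claim_equal_parse_suggested_actions
  intro s _
  unfold Spec_parse_suggested_actions parse_suggested_actions parse_suggested_actions_alt
  by_cases hg : s = "" ∨ s = "No immediate action required."
  · simp only [hg, if_true]
  · have hs : s ≠ "" := fun h => hg (Or.inl h)
    have hA := pvFoldA ((PySem.Str.split? s "\n").getD []) [] ""
    have hB := pvFoldB ((PySem.Str.split? s "\n").getD []) [] []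
    have hM := pvMain ((PySem.Str.split? s "\n").getD []) [] (by simp) (by simp)
    rw [pvJoin_nil] at hM
    simp only [List.nil_append] at hA hB
    simp only [hg, if_false]
    rw [hA, hB, hM]
    simp [hs]
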